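-- pv_equiv track=rewrite | github.com/ydhh-test/Giti_test | tests/unittests/services/analyzers/test_detect_pattern_continuity.py | _extract_ends_from_binary_row
-- ===== SOURCE A (Python) =====
-- def _extract_ends_from_binary_row(row, threshold, min_line_width=1, coarse_threshold=5):
--     """从二值行中提取端点"""
--     binary = [pixel <= threshold for pixel in row]
--
--     ends = []
--     i = 0
--     while i < len(binary):
--         if binary[i]:  # 找到深色像素
--             start_x = i
--             # 找到区间结束位置
--             while i < len(binary) and binary[i]:
--                 i += 1
--             end_x = i - 1
--
--             # 计算宽度
--             width = end_x - start_x + 1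
--
--             # 过滤噪音
--             if width >= min_line_width:
--                 # 判断粗细
--                 line_type = 'coarse' if width >= coarse_threshold else 'fine'
--
--                 # 粗线使用区间，细线使用中心点
--                 if line_type == 'fine':
--                     center_x = (start_x + end_x) // 2
--                     ends.append((center_x, center_x, 'fine'))
--                 else:
--                     ends.append((start_x, end_x, 'coarse'))
--         else:
--             i += 1
--
--     return ends
-- ===== SOURCE B (Python) =====
-- def _extract_ends_from_binary_row(row, threshold, min_line_width=1, coarse_threshold=5):
--     """Boundary detection: build start/end index lists by neighbor comparison, then zip them."""
--     binary = [pixel <= threshold for pixel in row]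
--     n = len(binary)
--     starts = [i for i in range(n) if binary[i] and (i == 0 or not binary[i - 1])]
--     stops = [i for i in range(n) if binary[i] and (i + 1 == n or not binary[i + 1])]
--     ends = []
--     for start_x, end_x in zip(starts, stops):
--         width = end_x - start_x + 1
--         if width >= min_line_width:
--             if width >= coarse_threshold:
--                 ends.append((start_x, end_x, 'coarse'))
--             else:
--                 center_x = (start_x + end_x) // 2
--                 ends.append((center_x, center_x, 'fine'))
--     return ends
-- ===== Notes on version B (the rewrite author's own statement) =====
-- stated objective: alternative
-- what changed: Instead of sequentially consuming runs with an index pointer and nested inner while, B detects run boundaries by neighbor comparison (two filtered index lists of run starts and run ends over the thresholded mask) and zips them into (start,end) pairs before applying the width/fine/coarse logic.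
import Mathlib
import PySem

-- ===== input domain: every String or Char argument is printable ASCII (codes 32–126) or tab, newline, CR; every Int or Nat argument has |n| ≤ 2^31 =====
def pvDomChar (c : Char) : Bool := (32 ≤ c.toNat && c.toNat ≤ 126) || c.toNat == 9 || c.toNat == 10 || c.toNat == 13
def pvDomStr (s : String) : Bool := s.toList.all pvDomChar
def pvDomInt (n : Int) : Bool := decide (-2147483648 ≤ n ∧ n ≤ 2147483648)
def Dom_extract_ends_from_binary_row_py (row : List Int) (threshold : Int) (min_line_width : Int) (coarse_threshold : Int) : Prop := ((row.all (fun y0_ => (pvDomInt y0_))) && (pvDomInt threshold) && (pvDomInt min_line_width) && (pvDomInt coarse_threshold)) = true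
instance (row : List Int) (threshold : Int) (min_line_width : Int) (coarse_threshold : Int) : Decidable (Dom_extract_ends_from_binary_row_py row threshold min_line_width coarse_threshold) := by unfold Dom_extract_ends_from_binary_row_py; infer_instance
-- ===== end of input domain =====

-- B detects run boundaries by neighbor comparison (two filtered index lists of starts and ends, zipped) instead of A's sequential index-pointer scan with a nested inner while (alternative decomposition; same cost).


-- ===== PORT A =====
-- inner `while i < len(binary) and binary[i]` loop: advances i over leading True pixels
def pvInnerWhile (binary : List Bool) (i : Int) : Int × List Bool :=
  match binary with
  | [] => (i, [])
  | b :: rest => if b then pvInnerWhile rest (i + 1) else (i, b :: rest)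

theorem pvInnerWhile_len (l : List Bool) (j : Int) : (pvInnerWhile l j).2.length ≤ l.length := by
  induction l generalizing j with
  | nil => simp [pvInnerWhile]
  | cons x xs ih =>
    simp only [pvInnerWhile]
    split
    · exact Nat.le_trans (ih (j + 1)) (Nat.le_succ _)
    · simp

-- outer `while i < len(binary)` loop of A
def pvOuterA (binary : List Bool) (i : Int) (min_line_width : Int) (coarse_threshold : Int) : List (Int × Int × String) :=
  match binary with
  | [] => []
  | b :: rest =>
    if b then
      let start_x := i
      let p := pvInnerWhile rest (i + 1)
      let end_x := p.1 - 1
      let width := end_x - start_x + 1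
      let tail := pvOuterA p.2 p.1 min_line_width coarse_threshold
      if width ≥ min_line_width then
        if width ≥ coarse_threshold then (start_x, end_x, "coarse") :: tail
        else
          let center_x := PySem.Int.floordiv (start_x + end_x) 2
          (center_x, center_x, "fine") :: tail
      else tail
    else pvOuterA rest (i + 1) min_line_width coarse_threshold
termination_by binary.length
decreasing_by
  · have := pvInnerWhile_len rest (i + 1)
    simp only [List.length_cons]
    omega
  · simp

def extract_ends_from_binary_row_py (row : List Int) (threshold : Int) (min_line_width : Int) (coarse_threshold : Int) : List (Int × Int × String) :=
  let binary := row.map (fun pixel => decide (pixel ≤ threshold))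
  pvOuterA binary 0 min_line_width coarse_threshold

-- ===== PORT B =====
-- starts = [i for i in range(n) if binary[i] and (i == 0 or not binary[i-1])]
def pvStartsB (b : List Bool) : List Nat :=
  (List.range b.length).filter (fun i => b.getD i false && (i == 0 || !(b.getD (i - 1) false)))

-- stops = [i for i in range(n) if binary[i] and (i + 1 == n or not binary[i+1])]
def pvStopsB (b : List Bool) : List Nat :=
  (List.range b.length).filter (fun i => b.getD i false && (i + 1 == b.length || !(b.getD (i + 1) false)))

-- `for start_x, end_x in zip(starts, stops): ...` loop of B
def pvLoopB (pairs : List (Nat × Nat)) (min_line_width : Int) (coarse_threshold : Int) : List (Int × Int × String) :=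
  match pairs with
  | [] => []
  | (s, e) :: t =>
    let width : Int := (e : Int) - (s : Int) + 1
    let tail := pvLoopB t min_line_width coarse_threshold
    if width ≥ min_line_width then
      if width ≥ coarse_threshold then ((s : Int), (e : Int), "coarse") :: tail
      else
        let center_x := PySem.Int.floordiv ((s : Int) + (e : Int)) 2
        (center_x, center_x, "fine") :: tail
    else tail

def extract_ends_from_binary_row_py_alt (row : List Int) (threshold : Int) (min_line_width : Int) (coarse_threshold : Int) : List (Int × Int × String) :=
  let binary := row.map (fun pixel => decide (pixel ≤ threshold))
  pvLoopB ((pvStartsB binary).zip (pvStopsB binary)) min_line_width coarse_threshold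

-- ===== PRECONDITION & SPEC =====
def Spec_extract_ends_from_binary_row_py (row : List Int) (threshold : Int) (min_line_width : Int) (coarse_threshold : Int) (out : List (Int × Int × String)) : Prop := out = extract_ends_from_binary_row_py_alt row threshold min_line_width coarse_threshold
instance (row : List Int) (threshold : Int) (min_line_width : Int) (coarse_threshold : Int) (out : List (Int × Int × String)) : Decidable (Spec_extract_ends_from_binary_row_py row threshold min_line_width coarse_threshold out) := by unfold Spec_extract_ends_from_binary_row_py; infer_instance

-- ===== CLAIM (what is proved, stated in full; the proofs are below) =====
def Claim_equal_extract_ends_from_binary_row_py : Prop := ∀ (row : List Int) (threshold : Int) (min_line_width : Int) (coarse_threshold : Int), Dom_extract_ends_from_binary_row_py row threshold min_line_width coarse_threshold → Spec_extract_ends_from_binary_row_py row threshold min_line_width coarse_threshold (extract_ends_from_binary_row_py row threshold min_line_width coarse_threshold)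

-- ===== LEMMAS AND PROOFS =====

-- run-length span of leading `b`s (proof-side normal form for both programs)
def pvGroupSpan (b : Bool) (l : List Bool) : Nat × List Bool :=
  match l with
  | [] => (0, [])
  | x :: rest => if x == b then let p := pvGroupSpan b rest; (p.1 + 1, p.2) else (0, x :: rest)

theorem pvGroupSpan_len (b : Bool) (l : List Bool) : (pvGroupSpan b l).2.length ≤ l.length := by
  induction l with
  | nil => simp [pvGroupSpan]
  | cons x xs ih =>
    simp only [pvGroupSpan]
    split
    · exact Nat.le_trans ih (Nat.le_succ _)
    · simp

theorem pvGroupSpan_head (b : Bool) (l : List Bool) : (pvGroupSpan b l).2.head? ≠ some b := by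
  induction l with
  | nil => simp [pvGroupSpan]
  | cons x xs ih =>
    simp only [pvGroupSpan]
    split
    · simpa using ih
    · rename_i h
      simp only [List.head?_cons, ne_eq, Option.some.injEq]
      intro hx
      exact h (by simp [hx])

theorem pvInner_span (l : List Bool) (j : Int) :
    pvInnerWhile l j = (j + ((pvGroupSpan true l).1 : Int), (pvGroupSpan true l).2) := by
  induction l generalizing j with
  | nil => simp [pvInnerWhile, pvGroupSpan]
  | cons x xs ih =>
    simp only [pvInnerWhile, pvGroupSpan]
    by_cases hx : x = true
    · subst hx
      simp only [if_true, beq_self_eq_true, ih, Prod.mk.injEq]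
      exact ⟨by push_cast; ring, trivial⟩
    · have hx2 : x = false := by simpa using hx
      subst hx2
      simp

-- recursive characterizations of B's two index comprehensions
def pvSIdx : Bool → List Bool → List Nat
  | _, [] => []
  | prev, x :: xs => (if x && !prev then [0] else []) ++ (pvSIdx x xs).map (· + 1)

def pvEIdx : List Bool → List Nat
  | [] => []
  | x :: xs => (if x && !(xs.getD 0 false) then [0] else []) ++ (pvEIdx xs).map (· + 1)

theorem pvFilterMap (l : List Nat) (f : Nat → Nat) (p : Nat → Bool) :
    (l.map f).filter p = (l.filter (fun a => p (f a))).map f := by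
  induction l with
  | nil => rfl
  | cons x xs ih => by_cases h : p (f x) <;> simp [List.filter, h, ih]

theorem pvStartsB_gen (l : List Bool) (prev : Bool) :
    (List.range l.length).filter (fun i => l.getD i false && !((prev :: l).getD i false)) = pvSIdx prev l := by
  induction l generalizing prev with
  | nil => rfl
  | cons x xs ih =>
    simp only [List.length_cons, List.range_succ_eq_map, List.filter_cons, pvFilterMap]
    have hp : (fun i => (x :: xs).getD (i + 1) false && !((prev :: x :: xs).getD (i + 1) false))
        = (fun i => xs.getD i false && !((x :: xs).getD i false)) := by
      funext i; simp
    simp only [Nat.succ_eq_add_one]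
    rw [hp, ih x]
    cases x <;> cases prev <;> simp [pvSIdx]

theorem pvStartsB_eq (l : List Bool) : pvStartsB l = pvSIdx false l := by
  have hcond : (fun i => l.getD i false && (i == 0 || !(l.getD (i - 1) false)))
      = (fun i => l.getD i false && !((false :: l).getD i false)) := by
    funext i; cases i <;> simp
  unfold pvStartsB
  rw [hcond, pvStartsB_gen]

theorem pvStopsB_gen (l : List Bool) :
    (List.range l.length).filter (fun i => l.getD i false && !(l.getD (i + 1) false)) = pvEIdx l := by
  induction l with
  | nil => rfl
  | cons x xs ih =>
    simp only [List.length_cons, List.range_succ_eq_map, List.filter_cons, pvFilterMap]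
    have hp : (fun i => (x :: xs).getD (i + 1) false && !((x :: xs).getD (i + 1 + 1) false))
        = (fun i => xs.getD i false && !(xs.getD (i + 1) false)) := by
      funext i; simp
    simp only [Nat.succ_eq_add_one]
    rw [hp, ih]
    cases x <;> cases hg : xs[0]?.getD false <;>
      simp [pvEIdx, List.getD, hg]

theorem pvStopsB_eq (l : List Bool) : pvStopsB l = pvEIdx l := by
  have hcond : (fun i => l.getD i false && (i + 1 == l.length || !(l.getD (i + 1) false)))
      = (fun i => l.getD i false && !(l.getD (i + 1) false)) := by
    funext i
    by_cases h : i + 1 = l.length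
    · simp [h]
    · have hb : (i + 1 == l.length) = false := by simpa using h
      simp [hb]
  unfold pvStopsB
  rw [hcond, pvStopsB_gen]

-- skipping a run: pvSIdx across the leading true-block
theorem pvSIdx_span (l : List Bool) :
    pvSIdx true l = (pvSIdx true (pvGroupSpan true l).2).map (· + (pvGroupSpan true l).1) := by
  induction l with
  | nil => simp [pvSIdx, pvGroupSpan]
  | cons x xs ih =>
    by_cases hx : x = true
    · subst hx
      have step : pvSIdx true (true :: xs) = (pvSIdx true xs).map (· + 1) := by
        simp [pvSIdx]
      rw [step, ih, List.map_map]
      simp only [pvGroupSpan, beq_self_eq_true, if_true]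
      exact List.map_congr_left (fun a _ => by simp only [Function.comp_apply]; omega)
    · have hx2 : x = false := by simpa using hx
      subst hx2
      simp [pvGroupSpan, pvSIdx]

theorem pvSIdx_head_indep (l : List Bool) (h : l.head? ≠ some true) :
    pvSIdx true l = pvSIdx false l := by
  cases l with
  | nil => rfl
  | cons x xs =>
    cases x with
    | false => simp [pvSIdx]
    | true => simp at h

theorem pvSIdx_true (rest : List Bool) :
    pvSIdx false (true :: rest)
      = 0 :: (pvSIdx false (pvGroupSpan true rest).2).map (· + ((pvGroupSpan true rest).1 + 1)) := by
  simp only [pvSIdx, Bool.not_false, Bool.and_true]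
  rw [pvSIdx_span, pvSIdx_head_indep _ (pvGroupSpan_head true rest), List.map_map]
  congr 1

theorem pvEIdx_true (rest : List Bool) :
    pvEIdx (true :: rest)
      = (pvGroupSpan true rest).1 :: (pvEIdx (pvGroupSpan true rest).2).map (· + ((pvGroupSpan true rest).1 + 1)) := by
  induction rest with
  | nil => simp [pvEIdx, pvGroupSpan]
  | cons y ys ih =>
    by_cases hy : y = true
    · subst hy
      have step : pvEIdx (true :: true :: ys) = (pvEIdx (true :: ys)).map (· + 1) := by
        simp [pvEIdx]
      rw [step, ih]
      simp only [pvGroupSpan, beq_self_eq_true, if_true, List.map_cons, List.map_map]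
      refine congrArg₂ _ rfl ?_
      exact List.map_congr_left (fun a _ => by simp only [Function.comp_apply]; omega)
    · have hy2 : y = false := by simpa using hy
      subst hy2
      simp [pvEIdx, pvGroupSpan]

-- absolute-offset form of B's zip loop
def pvProcAt (i : Int) (pairs : List (Nat × Nat)) (m c : Int) : List (Int × Int × String) :=
  match pairs with
  | [] => []
  | (s, e) :: t =>
    let S := i + (s : Int)
    let E := i + (e : Int)
    let w := E - S + 1
    let tail := pvProcAt i t m c
    if w ≥ m then
      if w ≥ c then (S, E, "coarse") :: tail
      else
        let cx := PySem.Int.floordiv (S + E) 2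
        (cx, cx, "fine") :: tail
    else tail

theorem pvLoopB_eq_procAt (pairs : List (Nat × Nat)) (m c : Int) :
    pvLoopB pairs m c = pvProcAt 0 pairs m c := by
  induction pairs with
  | nil => rfl
  | cons p t ih =>
    obtain ⟨s, e⟩ := p
    simp only [pvLoopB, pvProcAt, ih, zero_add]

theorem pvProcAt_shift (pairs : List (Nat × Nat)) (i : Int) (K : Nat) (m c : Int) :
    pvProcAt i (pairs.map (fun p => (p.1 + K, p.2 + K))) m c = pvProcAt (i + K) pairs m c := by
  induction pairs with
  | nil => rfl
  | cons p t ih =>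
    obtain ⟨s, e⟩ := p
    simp only [List.map_cons, pvProcAt, ih]
    have h1 : i + ((s + K : Nat) : Int) = i + K + s := by push_cast; ring
    have h2 : i + ((e + K : Nat) : Int) = i + K + e := by push_cast; ring
    rw [h1, h2]

theorem pvZipShift (a b : List Nat) (K : Nat) :
    ((a.map (· + K)).zip (b.map (· + K))) = (a.zip b).map (fun p => (p.1 + K, p.2 + K)) := by
  rw [List.zip_map]
  rfl

theorem pvMain (n : Nat) (l : List Bool) (hl : l.length ≤ n) (i m c : Int) :
    pvOuterA l i m c = pvProcAt i ((pvSIdx false l).zip (pvEIdx l)) m c := by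
  induction n generalizing l i with
  | zero =>
    have : l = [] := by cases l <;> simp_all
    subst this
    simp [pvOuterA, pvSIdx, pvEIdx, pvProcAt]
  | succ n ih =>
    cases l with
    | nil => simp [pvOuterA, pvSIdx, pvEIdx, pvProcAt]
    | cons b rest =>
      by_cases hb : b = true
      · subst hb
        have hrec : (pvGroupSpan true rest).2.length ≤ n := by
          have := pvGroupSpan_len true rest
          simp at hl; omega
        set k := (pvGroupSpan true rest).1 with hk
        set r := (pvGroupSpan true rest).2 with hr
        simp only [pvOuterA, if_true, pvInner_span, pvSIdx_true, pvEIdx_true, ← hk, ← hr]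
        rw [List.zip_cons_cons, pvZipShift]
        simp only [pvProcAt, pvProcAt_shift]
        rw [ih r hrec (i + 1 + (k : Int))]
        rw [show i + ((k + 1 : Nat) : Int) = i + 1 + (k : Int) by push_cast; ring]
        rw [show i + 1 + (k : Int) - 1 = i + (k : Int) by ring]
        norm_num
      · have hb2 : b = false := by simpa using hb
        subst hb2
        have hrec : rest.length ≤ n := by simp at hl; omega
        have hs : pvSIdx false (false :: rest) = (pvSIdx false rest).map (· + 1) := by
          simp [pvSIdx]
        have he : pvEIdx (false :: rest) = (pvEIdx rest).map (· + 1) := by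
          simp [pvEIdx]
        simp only [pvOuterA, Bool.false_eq_true, if_false, hs, he]
        rw [pvZipShift, pvProcAt_shift]
        norm_num
        exact ih rest hrec (i + 1)

-- ===== VERDICT (by name: the statement is the Claim_ definition above) =====
theorem extract_ends_from_binary_row_py_spec : Claim_equal_extract_ends_from_binary_row_py := by
  intro row threshold m c _
  unfold Spec_extract_ends_from_binary_row_py extract_ends_from_binary_row_py extract_ends_from_binary_row_py_alt
  dsimp only
  rw [pvStartsB_eq, pvStopsB_eq, pvLoopB_eq_procAt]
  exact pvMain _ _ (Nat.le_refl _) 0 m c
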